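-- pv_equiv track=rewrite | github.com/SergioAndes/KataExample | untitled2/KataSimple.py | iteracion1
-- ===== SOURCE A (Python) =====
-- def iteracion1(cadena):
--     if cadena == "":
--         return [0]
--     elif "," in cadena:
--         numeros = cadena.split(",")
--         cantidad = 0
--         for num in numeros:
--             cantidad += 1
--         return [cantidad]
--     else:
--         return [1]
-- ===== SOURCE B (Python) =====
-- def iteracion1(cadena):
--     if cadena == "":
--         return [0]
--     return [cadena.count(",") + 1]
-- ===== Notes on version B (the rewrite author's own statement) =====
-- stated objective: simpler
-- what changed: Collapses the three-way branch and the counting loop over the split pieces into one closed-form expression: for non-empty input the answer is the number of comma delimiters plus one, so no list is built and no explicit loop runs.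
import Mathlib
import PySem

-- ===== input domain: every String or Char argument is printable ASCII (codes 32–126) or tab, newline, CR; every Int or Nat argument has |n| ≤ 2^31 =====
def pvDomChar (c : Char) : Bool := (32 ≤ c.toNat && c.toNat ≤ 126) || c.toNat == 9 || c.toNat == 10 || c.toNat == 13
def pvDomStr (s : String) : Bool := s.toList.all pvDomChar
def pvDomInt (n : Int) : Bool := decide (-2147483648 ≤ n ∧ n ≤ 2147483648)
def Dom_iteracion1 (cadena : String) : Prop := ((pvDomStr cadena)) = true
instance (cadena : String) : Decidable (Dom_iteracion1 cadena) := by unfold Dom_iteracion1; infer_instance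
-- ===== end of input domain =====

-- B collapses A's three-way branch and its counting loop over the split pieces into
-- a closed form: for non-empty input, number of comma delimiters plus one.

-- ===== PORT A =====
def iteracion1 (cadena : String) : List Int :=
  if cadena == "" then [0]
  else if PySem.Str.isIn "," cadena then
    let numeros : List String := (PySem.Chars.splitOn cadena.toList [',']).map String.ofList
    let cantidad : Int := numeros.foldl (fun acc _ => acc + 1) 0
    [cantidad]
  else [1]

-- ===== PORT B =====
def iteracion1_alt (cadena : String) : List Int :=
  if cadena == "" then [0]
  else [(PySem.Str.count cadena "," : Int) + 1]

-- ===== PRECONDITION & SPEC =====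
def Spec_iteracion1 (cadena : String) (out : List Int) : Prop := out = iteracion1_alt cadena
instance (cadena : String) (out : List Int) : Decidable (Spec_iteracion1 cadena out) := by unfold Spec_iteracion1; infer_instance

-- ===== CLAIM (what is proved, stated in full; the proofs are below) =====
def Claim_equal_iteracion1 : Prop := ∀ (cadena : String), Dom_iteracion1 cadena → Spec_iteracion1 cadena (iteracion1 cadena)

-- ===== LEMMAS AND PROOFS =====

-- the counting loop over any list computes its length
theorem pv_foldl_len {α : Type} (l : List α) (a : Int) :
    l.foldl (fun acc _ => acc + 1) a = a + l.length := by
  induction l generalizing a with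
  | nil => simp
  | cons h t ih => simp [List.foldl, ih]; omega

theorem pv_count_go (c : Char) (l : List Char) (fuel : Nat) (acc : Nat)
    (h : l.length ≤ fuel) :
    PySem.Chars.count.go [c] fuel l acc = acc + l.count c := by
  induction l generalizing fuel acc with
  | nil => cases fuel <;> simp [PySem.Chars.count.go]
  | cons x t ih =>
      cases fuel with
      | zero => simp at h
      | succ f =>
          rw [PySem.Chars.count.go.eq_def]
          simp only [List.isPrefixOf, List.length_cons] at *
          by_cases hx : c = x
          · subst hx
            simp only [BEq.rfl, Bool.true_and, if_pos]
            rw [show List.drop (([] : List Char).length + 1) (c :: t) = t by simp,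
              ih f (acc + 1) (by omega)]
            simp [List.count_cons]
            omega
          · have hx' : ¬x = c := fun hh => hx hh.symm
            rw [if_neg (by simp [hx]), ih f acc (by omega)]
            simp [List.count_cons, hx']

theorem pv_splitOn_go_len (c : Char) (l : List Char) (fuel : Nat)
    (cur : List Char) (acc : List (List Char)) (h : l.length ≤ fuel) :
    (PySem.Chars.splitOn.go [c] fuel l cur acc).length = acc.length + 1 + l.count c := by
  induction l generalizing fuel cur acc with
  | nil => cases fuel <;> simp [PySem.Chars.splitOn.go]
  | cons x t ih =>
      cases fuel with
      | zero => simp at h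
      | succ f =>
          rw [PySem.Chars.splitOn.go.eq_def]
          simp only [List.length_cons] at *
          by_cases hx : c = x
          · subst hx
            simp only [List.isPrefixOf, BEq.rfl, Bool.true_and, if_pos]
            rw [show List.drop (([] : List Char).length + 1) (c :: t) = t by simp,
              ih f [] (cur.reverse :: acc) (by omega)]
            simp [List.count_cons]
            omega
          · have hx' : ¬x = c := fun hh => hx hh.symm
            rw [if_neg (by simp [List.isPrefixOf, hx]), ih f (x :: cur) acc (by omega)]
            simp [List.count_cons, hx']

theorem pv_count_eq (s : List Char) (c : Char) :
    PySem.Chars.count s [c] = s.count c := by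
  have := pv_count_go c s s.length 0 (le_refl _)
  simpa [PySem.Chars.count] using this

theorem pv_splitOn_len (s : List Char) (c : Char) :
    (PySem.Chars.splitOn s [c]).length = s.count c + 1 := by
  unfold PySem.Chars.splitOn
  rw [pv_splitOn_go_len c s (s.length + 1) [] [] (by omega)]
  simp; omega

theorem pv_singleton_infix {c : Char} {l : List Char} :
    [c] <:+: l ↔ c ∈ l := by
  constructor
  · intro h
    exact (List.singleton_sublist).1 h.sublist
  · intro h
    obtain ⟨u, v, rfl⟩ := List.append_of_mem h
    exact ⟨u, v, by simp⟩

-- ===== VERDICT (by name: the statement is the Claim_ definition above) =====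
theorem iteracion1_spec : Claim_equal_iteracion1 := by
  intro cadena _
  unfold Spec_iteracion1 iteracion1 iteracion1_alt
  by_cases he : cadena == ""
  · simp [he]
  · simp only [he, if_false]
    by_cases hc : PySem.Str.isIn "," cadena = true
    · simp only [hc, if_true]
      rw [pv_foldl_len]
      have : PySem.Str.count cadena "," = cadena.toList.count ',' := by
        simpa [PySem.Str.count] using pv_count_eq cadena.toList ','
      rw [this]
      simp [pv_splitOn_len]
    · simp only [hc, if_false]
      have hmem : ',' ∉ cadena.toList := by
        rw [Bool.not_eq_true] at hc
        have := (PySem.Chars.isIn_eq_false_iff (sub := (",").toList)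
          (s := cadena.toList)).1 (by simpa [PySem.Str.isIn] using hc)
        intro hm
        exact this (pv_singleton_infix.2 hm)
      have h0 : PySem.Chars.count cadena.toList [','] = 0 := by
        rw [pv_count_eq, List.count_eq_zero]; exact hmem
      simpa using h0
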